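-- pv_equiv track=rewrite | github.com/sachinj1496/s45-ai | src/utils.py | _month_from_english_name
-- ===== SOURCE A (Python) =====
-- from typing import TYPE_CHECKING, Any, Optional
--
-- _MONTH_NAMES = {
--     "january": 1,
--     "february": 2,
--     "march": 3,
--     "april": 4,
--     "may": 5,
--     "june": 6,
--     "july": 7,
--     "august": 8,
--     "september": 9,
--     "october": 10,
--     "november": 11,
--     "december": 12,
-- }
--
-- def _month_from_english_name(name: str) -> Optional[int]:
--     key = name.strip().lower()
--     if key in _MONTH_NAMES:
--         return _MONTH_NAMES[key]
--     for full, num in _MONTH_NAMES.items():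
--         if full.startswith(key) or key.startswith(full[:3]):
--             return num
--     return None
-- ===== SOURCE B (Python) =====
-- _MONTH_NAMES = {
--     "january": 1,
--     "february": 2,
--     "march": 3,
--     "april": 4,
--     "may": 5,
--     "june": 6,
--     "july": 7,
--     "august": 8,
--     "september": 9,
--     "october": 10,
--     "november": 11,
--     "december": 12,
-- }
--
-- def _month_from_english_name(name):
--     key = name.strip().lower()
--     for full, num in _MONTH_NAMES.items():
--         if full.startswith(key):
--             return num
--     for full, num in _MONTH_NAMES.items():
--         if key.startswith(full[:3]):
--             return num
--     return None
-- ===== Notes on version B (the rewrite author's own statement) =====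
-- stated objective: simpler
-- what changed: B drops A's redundant exact-lookup shortcut and replaces A's single scan with an or-condition by two sequential scans over the month table: a full-name-prefix pass, then a three-letter-prefix pass only if the first finds nothing (sound because the twelve 3-letter prefixes are pairwise distinct).
import Mathlib
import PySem

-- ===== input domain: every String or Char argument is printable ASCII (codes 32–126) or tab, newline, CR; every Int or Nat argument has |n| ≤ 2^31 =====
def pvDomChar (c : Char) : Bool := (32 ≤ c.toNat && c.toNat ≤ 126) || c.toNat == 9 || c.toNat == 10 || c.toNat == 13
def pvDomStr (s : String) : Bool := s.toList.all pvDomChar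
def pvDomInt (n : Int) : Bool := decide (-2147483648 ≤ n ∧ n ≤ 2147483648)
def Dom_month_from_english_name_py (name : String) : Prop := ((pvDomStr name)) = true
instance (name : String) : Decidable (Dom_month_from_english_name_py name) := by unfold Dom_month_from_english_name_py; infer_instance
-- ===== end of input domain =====

-- B drops A's redundant exact-lookup shortcut and splits A's single or-condition scan into two
-- sequential scans (full-name-prefix pass first, then three-letter-prefix pass); objective: simpler.

-- ===== PORT A =====

def pvMonthsList : List (String × Int) :=
  [("january", 1), ("february", 2), ("march", 3), ("april", 4), ("may", 5), ("june", 6),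
   ("july", 7), ("august", 8), ("september", 9), ("october", 10), ("november", 11), ("december", 12)]

def pvMonths : PySem.Dict String Int := PySem.Dict.ofList pvMonthsList

-- the for-loop of A: first pair whose full name starts with key or whose 3-letter prefix starts key
def pvLoopA : List (String × Int) → String → Option Int
  | [], _ => none
  | (full, num) :: rest, key =>
      if PySem.Str.startswith full key
          || PySem.Str.startswith key (PySem.Str.slice full none (some 3)) then some num
      else pvLoopA rest key

def month_from_english_name_py (name : String) : Option Int :=
  let key := PySem.Str.lower (PySem.Str.strip name)
  match PySem.Dict.get? pvMonths key with
  | some v => some v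
  | none => pvLoopA pvMonths.items key

-- ===== PORT B =====

-- first pass of B: first pair whose full name starts with key
def pvLoopB1 : List (String × Int) → String → Option Int
  | [], _ => none
  | (full, num) :: rest, key =>
      if PySem.Str.startswith full key then some num else pvLoopB1 rest key

-- second pass of B: first pair whose 3-letter prefix starts key
def pvLoopB2 : List (String × Int) → String → Option Int
  | [], _ => none
  | (full, num) :: rest, key =>
      if PySem.Str.startswith key (PySem.Str.slice full none (some 3)) then some num
      else pvLoopB2 rest key

-- B's body after computing key: pass 1, and pass 2 only if pass 1 found nothing
def pvPasses (L : List (String × Int)) (key : String) : Option Int :=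
  match pvLoopB1 L key with
  | some v => some v
  | none => pvLoopB2 L key

def month_from_english_name_py_alt (name : String) : Option Int :=
  let key := PySem.Str.lower (PySem.Str.strip name)
  pvPasses pvMonthsList key

-- ===== PRECONDITION & SPEC =====
def Spec_month_from_english_name_py (name : String) (out : Option Int) : Prop := out = month_from_english_name_py_alt name
instance (name : String) (out : Option Int) : Decidable (Spec_month_from_english_name_py name out) := by unfold Spec_month_from_english_name_py; infer_instance

-- ===== CLAIM (what is proved, stated in full; the proofs are below) =====
def Claim_equal_month_from_english_name_py : Prop := ∀ (name : String), Dom_month_from_english_name_py name → Spec_month_from_english_name_py name (month_from_english_name_py name)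

-- ===== LEMMAS AND PROOFS =====

-- abbreviations (Chars form) for A's two tests on a table entry
def pvC1 (key : String) (p : String × Int) : Bool :=
  PySem.Chars.startswith p.1.toList key.toList
def pvC2 (key : String) (p : String × Int) : Bool :=
  PySem.Chars.startswith key.toList (PySem.List.slice p.1.toList none (some 3))

lemma pvLoopB1_some {L : List (String × Int)} {key : String} {v : Int}
    (h : pvLoopB1 L key = some v) : ∃ b ∈ L, pvC1 key b = true ∧ b.2 = v := by
  induction L with
  | nil => simp [pvLoopB1] at h
  | cons p rest ih =>
      obtain ⟨full, num⟩ := p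
      by_cases hc : pvC1 key (full, num) = true
      · refine ⟨(full, num), by simp, hc, ?_⟩
        simp only [pvLoopB1] at h
        rw [if_pos (by simpa [pvC1] using hc)] at h
        exact Option.some_inj.mp h
      · simp only [pvLoopB1] at h
        rw [if_neg (by simpa [pvC1] using hc)] at h
        obtain ⟨b, hb, h1, h2⟩ := ih h
        exact ⟨b, by simp [hb], h1, h2⟩

-- A's combined scan equals B's two sequential scans, given that any c2-hit and c1-hit carry equal values
lemma pvLoop_eq (L : List (String × Int)) (key : String)
    (H : ∀ a ∈ L, ∀ b ∈ L, pvC2 key a = true → pvC1 key b = true → a.2 = b.2) :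
    pvLoopA L key = pvPasses L key := by
  induction L with
  | nil => simp [pvLoopA, pvPasses, pvLoopB1, pvLoopB2]
  | cons p rest ih =>
      obtain ⟨full, num⟩ := p
      simp only [pvPasses]
      by_cases h1 : pvC1 key (full, num) = true
      · simp only [pvC1] at h1
        simp [pvLoopA, pvLoopB1, h1]
      · simp only [pvC1] at h1
        by_cases h2 : pvC2 key (full, num) = true
        · have h2' := h2
          simp only [pvC2] at h2'
          simp only [pvLoopA, pvLoopB1, pvLoopB2]
          simp only [PySem.Str.startswith_eq, PySem.Str.toList_slice,
            PySem.Chars.slice_eq_listSlice, h1, h2', Bool.false_or, if_true,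
            Bool.false_eq_true, if_false]
          cases hb : pvLoopB1 rest key with
          | none => simp
          | some v =>
              obtain ⟨b, hb', hc1, hv⟩ := pvLoopB1_some hb
              have := H (full, num) (by simp) b (by simp [hb']) h2 hc1
              simp [← hv, ← this]
        · have h2' := h2
          simp only [pvC2] at h2'
          simp only [pvLoopA, pvLoopB1, pvLoopB2]
          simp only [PySem.Str.startswith_eq, PySem.Str.toList_slice,
            PySem.Chars.slice_eq_listSlice, h1, h2', Bool.or_self,
            Bool.false_eq_true, if_false]
          exact ih (fun a ha b hb => H a (by simp [ha]) b (by simp [hb]))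

-- concrete fact about the 12 months: if a's 3-letter prefix is a prefix of b's name, values agree
lemma pvMonths_disjoint (a : String × Int) (ha : a ∈ pvMonthsList)
    (b : String × Int) (hb : b ∈ pvMonthsList)
    (h : PySem.List.slice a.1.toList none (some 3) <+: b.1.toList) : a.2 = b.2 := by
  simp only [pvMonthsList, List.mem_cons, List.not_mem_nil, or_false] at ha hb
  rcases ha with rfl|rfl|rfl|rfl|rfl|rfl|rfl|rfl|rfl|rfl|rfl|rfl <;>
    rcases hb with rfl|rfl|rfl|rfl|rfl|rfl|rfl|rfl|rfl|rfl|rfl|rfl <;>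
      revert h <;> decide

-- the cross hypothesis holds for the month table, for every key
lemma pvH (key : String) : ∀ a ∈ pvMonthsList, ∀ b ∈ pvMonthsList,
    pvC2 key a = true → pvC1 key b = true → a.2 = b.2 := by
  intro a ha b hb h2 h1
  rw [pvC2, PySem.Chars.startswith_iff] at h2
  rw [pvC1, PySem.Chars.startswith_iff] at h1
  exact pvMonths_disjoint a ha b hb (h2.trans h1)

lemma pvMonths_mk : pvMonths = PySem.Dict.mk pvMonthsList := by decide

lemma pvItems_eq : pvMonths.items = pvMonthsList := by rw [pvMonths_mk]

-- ===== VERDICT (by name: the statement is the Claim_ definition above) =====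
set_option maxHeartbeats 2000000 in
theorem month_from_english_name_py_spec : Claim_equal_month_from_english_name_py := by
  intro name _
  unfold Spec_month_from_english_name_py
  simp only [month_from_english_name_py, month_from_english_name_py_alt]
  rw [pvItems_eq, pvMonths_mk]
  generalize PySem.Str.lower (PySem.Str.strip name) = key
  simp only [pvMonthsList, PySem.Dict.get?_mk_cons]
  by_cases h1 : ("january" == key) = true
  · rw [if_pos h1]; rw [beq_iff_eq] at h1; subst h1; decide
  · rw [if_neg h1]
    by_cases h2 : ("february" == key) = true
    · rw [if_pos h2]; rw [beq_iff_eq] at h2; subst h2; decide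
    · rw [if_neg h2]
      by_cases h3 : ("march" == key) = true
      · rw [if_pos h3]; rw [beq_iff_eq] at h3; subst h3; decide
      · rw [if_neg h3]
        by_cases h4 : ("april" == key) = true
        · rw [if_pos h4]; rw [beq_iff_eq] at h4; subst h4; decide
        · rw [if_neg h4]
          by_cases h5 : ("may" == key) = true
          · rw [if_pos h5]; rw [beq_iff_eq] at h5; subst h5; decide
          · rw [if_neg h5]
            by_cases h6 : ("june" == key) = true
            · rw [if_pos h6]; rw [beq_iff_eq] at h6; subst h6; decide
            · rw [if_neg h6]
              by_cases h7 : ("july" == key) = true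
              · rw [if_pos h7]; rw [beq_iff_eq] at h7; subst h7; decide
              · rw [if_neg h7]
                by_cases h8 : ("august" == key) = true
                · rw [if_pos h8]; rw [beq_iff_eq] at h8; subst h8; decide
                · rw [if_neg h8]
                  by_cases h9 : ("september" == key) = true
                  · rw [if_pos h9]; rw [beq_iff_eq] at h9; subst h9; decide
                  · rw [if_neg h9]
                    by_cases h10 : ("october" == key) = true
                    · rw [if_pos h10]; rw [beq_iff_eq] at h10; subst h10; decide
                    · rw [if_neg h10]
                      by_cases h11 : ("november" == key) = true
                      · rw [if_pos h11]; rw [beq_iff_eq] at h11; subst h11; decide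
                      · rw [if_neg h11]
                        by_cases h12 : ("december" == key) = true
                        · rw [if_pos h12]; rw [beq_iff_eq] at h12; subst h12; decide
                        · rw [if_neg h12]
                          show pvLoopA pvMonthsList key = pvPasses pvMonthsList key
                          exact pvLoop_eq pvMonthsList key (pvH key)
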